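-- pv_equiv track=rewrite | github.com/davidmtobias/curso-ultimate-python | ejercicio2.py | mayores_tuplas
-- ===== SOURCE A (Python) =====
-- def mayores_tuplas(lista):
--     tuplas = []
--     valor = 0
--     for tupla in lista:
--         if tupla[1] > valor:
--             tuplas.clear()
--             tuplas.append(tupla)
--             valor = tupla[1]
--         elif tupla[1] == valor:
--             tuplas.append(tupla)
--
--     return tuplas
-- ===== SOURCE B (Python) =====
-- def mayores_tuplas(lista):
--     valor = 0
--     for tupla in lista:
--         if tupla[1] > valor:
--             valor = tupla[1]
--     return [tupla for tupla in lista if tupla[1] == valor]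
-- ===== Notes on version B (the rewrite author's own statement) =====
-- stated objective: simpler
-- what changed: Replaces A's single clear-and-rebuild pass over a mutable result list by a find-max pass (seeded at 0, like A) followed by a filter comprehension.
import Mathlib
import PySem

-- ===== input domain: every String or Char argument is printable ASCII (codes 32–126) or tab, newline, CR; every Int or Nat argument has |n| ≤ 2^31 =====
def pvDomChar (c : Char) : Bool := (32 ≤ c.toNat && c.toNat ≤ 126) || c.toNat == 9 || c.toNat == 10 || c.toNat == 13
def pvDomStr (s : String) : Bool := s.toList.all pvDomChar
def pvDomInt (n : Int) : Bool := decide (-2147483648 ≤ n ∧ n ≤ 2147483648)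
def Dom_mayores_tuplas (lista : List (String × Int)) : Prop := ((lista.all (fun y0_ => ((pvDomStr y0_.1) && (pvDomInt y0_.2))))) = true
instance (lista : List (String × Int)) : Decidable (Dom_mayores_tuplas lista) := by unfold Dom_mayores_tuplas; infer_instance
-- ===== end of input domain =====

-- B replaces A's clear-and-rebuild accumulator pass by a find-max pass (seeded at 0, as A) plus a filter pass; objective: simpler.

-- ===== PORT A =====
def mayores_tuplas (lista : List (String × Int)) : List (String × Int) :=
  (lista.foldl
    (fun s tupla =>
      if tupla.2 > s.2 then ([tupla], tupla.2)
      else if tupla.2 == s.2 then (s.1 ++ [tupla], s.2)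
      else s)
    (([] : List (String × Int)), (0 : Int))).1

-- ===== PORT B =====
def mayores_tuplas_alt (lista : List (String × Int)) : List (String × Int) :=
  let valor := lista.foldl (fun v tupla => if tupla.2 > v then tupla.2 else v) (0 : Int)
  lista.filter (fun tupla => tupla.2 == valor)

-- ===== PRECONDITION & SPEC =====
def Spec_mayores_tuplas (lista : List (String × Int)) (out : List (String × Int)) : Prop := out = mayores_tuplas_alt lista
instance (lista : List (String × Int)) (out : List (String × Int)) : Decidable (Spec_mayores_tuplas lista out) := by unfold Spec_mayores_tuplas; infer_instance

-- ===== CLAIM (what is proved, stated in full; the proofs are below) =====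
def Claim_equal_mayores_tuplas : Prop := ∀ (lista : List (String × Int)), Dom_mayores_tuplas lista → Spec_mayores_tuplas lista (mayores_tuplas lista)

-- ===== LEMMAS AND PROOFS =====

-- the running maximum (B's first pass), started from an arbitrary seed
def pvFmax (v : Int) (xs : List (String × Int)) : Int :=
  xs.foldl (fun v tupla => if tupla.2 > v then tupla.2 else v) v

lemma pvFmax_ge (xs : List (String × Int)) : ∀ v : Int, v ≤ pvFmax v xs := by
  induction xs with
  | nil => intro v; simp [pvFmax]
  | cons t xs ih =>
    intro v
    simp only [pvFmax, List.foldl_cons]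
    by_cases h : t.2 > v
    · simp only [if_pos h]
      exact le_trans (le_of_lt h) (ih t.2)
    · simp only [if_neg h]
      exact ih v

-- A's fold state in closed form: the kept list and the running max
lemma foldA_closed (xs : List (String × Int)) :
    ∀ (ts : List (String × Int)) (v : Int),
    xs.foldl
      (fun s tupla =>
        if tupla.2 > s.2 then ([tupla], tupla.2)
        else if tupla.2 == s.2 then (s.1 ++ [tupla], s.2)
        else s)
      (ts, v)
    = ((if pvFmax v xs = v then ts else []) ++ xs.filter (fun t => t.2 == pvFmax v xs),
       pvFmax v xs) := by
  induction xs with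
  | nil => intro ts v; simp [pvFmax]
  | cons t xs ih =>
    intro ts v
    simp only [List.foldl_cons]
    by_cases h : t.2 > v
    · rw [if_pos h, ih [t] t.2]
      have hmax : pvFmax v (t :: xs) = pvFmax t.2 xs := by
        simp [pvFmax, if_pos h]
      rw [hmax]
      have hne : pvFmax t.2 xs ≠ v := by
        have := pvFmax_ge xs t.2
        omega
      rw [if_neg hne, List.filter_cons]
      by_cases he : pvFmax t.2 xs = t.2
      · have hb : (t.2 == pvFmax t.2 xs) = true := by simp [he]
        simp [he]
      · have hb : (t.2 == pvFmax t.2 xs) = false := by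
          simp only [beq_eq_false_iff_ne, ne_eq]; omega
        simp [he, hb]
    · rw [if_neg h]
      by_cases he : t.2 = v
      · have hb : (t.2 == v) = true := by simp [he]
        rw [hb, if_pos rfl, ih (ts ++ [t]) v]
        have hmax : pvFmax v (t :: xs) = pvFmax v xs := by
          simp [pvFmax, if_neg h]
        rw [hmax, List.filter_cons]
        by_cases hm : pvFmax v xs = v
        · have hbm : (t.2 == pvFmax v xs) = true := by simp [he, hm]
          simp [hm, he]
        · have hbm : (t.2 == pvFmax v xs) = false := by
            have := pvFmax_ge xs v
            simp only [beq_eq_false_iff_ne, ne_eq]; omega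
          simp [hm, hbm]
      · have hb : (t.2 == v) = false := by simp [he]
        rw [hb, if_neg (by simp), ih ts v]
        have hmax : pvFmax v (t :: xs) = pvFmax v xs := by
          simp [pvFmax, if_neg h]
        rw [hmax, List.filter_cons]
        have hbm : (t.2 == pvFmax v xs) = false := by
          have := pvFmax_ge xs v
          simp only [beq_eq_false_iff_ne, ne_eq]; omega
        simp [hbm]

-- ===== VERDICT (by name: the statement is the Claim_ definition above) =====
theorem mayores_tuplas_spec : Claim_equal_mayores_tuplas := by
  intro lista _
  unfold Spec_mayores_tuplas mayores_tuplas mayores_tuplas_alt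
  rw [foldA_closed lista [] 0]
  simp [pvFmax]
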